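-- pv_equiv track=rewrite | github.com/mortennp/mooc | UCSD_Bioinformatics/BioinformaticsSpyder/BioinformaticsI/SequencingAntibiotics/convolution_cyclopeptide_sequencing_problem_2h.py | generate_linear_spectrum
-- ===== SOURCE A (Python) =====
-- from itertools import product
--
-- def generate_linear_spectrum(peptide):
--     weights = []
--     for (i,j) in product(range(len(peptide)), range(len(peptide)-1)):
--         if i+j < len(peptide):
--             weights.append(calc_mass(peptide[i:i+j+1]))
--     weights.append(0)
--     weights.append(calc_mass(peptide))
--     return weights
--
-- def calc_mass(peptide):
--     return sum(peptide)
-- ===== SOURCE B (Python) =====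
-- def generate_linear_spectrum(peptide):
--     # Prefix sums: each substring mass is one subtraction, O(n^2) total
--     # instead of A's O(n^3) (re-summing every slice).
--     pre = [0]
--     for x in peptide:
--         pre.append(pre[-1] + x)
--     n = len(peptide)
--     weights = [pre[end] - pre[i]
--                for i in range(n)
--                for end in range(i + 1, (n if i else n - 1) + 1)]
--     return weights + [0, pre[n]]
-- ===== Notes on version B (the rewrite author's own statement) =====
-- stated objective: faster
-- what changed: Replaces A's product-of-ranges loop that re-sums every slice with a prefix-sum array, so each substring mass is a single subtraction and the inner summation disappears.
import Mathlib
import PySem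

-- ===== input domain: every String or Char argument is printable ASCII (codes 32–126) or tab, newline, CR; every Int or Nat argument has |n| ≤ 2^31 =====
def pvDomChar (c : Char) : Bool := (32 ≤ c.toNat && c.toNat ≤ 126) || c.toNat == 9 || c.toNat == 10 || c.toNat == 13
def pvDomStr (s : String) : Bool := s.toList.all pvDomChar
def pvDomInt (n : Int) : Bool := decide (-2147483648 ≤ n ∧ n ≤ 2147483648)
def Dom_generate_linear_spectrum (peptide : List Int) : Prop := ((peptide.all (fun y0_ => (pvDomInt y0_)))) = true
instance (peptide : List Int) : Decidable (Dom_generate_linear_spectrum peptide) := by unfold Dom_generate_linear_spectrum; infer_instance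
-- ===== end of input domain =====

-- B replaces A's re-summing of every slice (O(n^3)) by a prefix-sum array so every
-- substring mass is one subtraction (O(n^2)); proved to return exactly A's list.

-- ===== PORT A =====
def calc_mass (peptide : List Int) : Int := peptide.sum

def generate_linear_spectrum (peptide : List Int) : List Int :=
  let n : Int := (peptide.length : Int)
  -- product(range(n), range(n-1)): all pairs (i, j), i outer
  let pairs : List (Int × Int) :=
    (PySem.List.pyRange 0 n 1).flatMap (fun i =>
      (PySem.List.pyRange 0 (n - 1) 1).map (fun j => (i, j)))
  let weights : List Int :=
    pairs.foldl (fun w p =>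
      if p.1 + p.2 < n then
        w ++ [calc_mass (PySem.List.slice peptide (some p.1) (some (p.1 + p.2 + 1)))]
      else w) []
  (weights ++ [0]) ++ [calc_mass peptide]

-- ===== PORT B =====
def generate_linear_spectrum_alt (peptide : List Int) : List Int :=
  let pre : List Int := List.scanl (· + ·) 0 peptide   -- pre[k] = mass of peptide[:k]
  let n : Nat := peptide.length
  let weights : List Int :=
    (List.range n).flatMap (fun i =>
      (List.range' (i + 1) ((if i = 0 then n - 1 else n) + 1 - (i + 1))).map
        (fun e => pre.getD e 0 - pre.getD i 0))
  weights ++ [0, pre.getD n 0]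

-- ===== PRECONDITION & SPEC =====
def Spec_generate_linear_spectrum (peptide : List Int) (out : List Int) : Prop := out = generate_linear_spectrum_alt peptide
instance (peptide : List Int) (out : List Int) : Decidable (Spec_generate_linear_spectrum peptide out) := by unfold Spec_generate_linear_spectrum; infer_instance

-- ===== CLAIM (what is proved, stated in full; the proofs are below) =====
def Claim_equal_generate_linear_spectrum : Prop := ∀ (peptide : List Int), Dom_generate_linear_spectrum peptide → Spec_generate_linear_spectrum peptide (generate_linear_spectrum peptide)

-- ===== LEMMAS AND PROOFS =====

-- pre[k] = a + mass of the first k elements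
theorem scanl_add_getD (l : List Int) (a : Int) (k : Nat) (hk : k ≤ l.length) :
    (List.scanl (· + ·) a l).getD k 0 = a + (l.take k).sum := by
  induction l generalizing a k with
  | nil =>
    have : k = 0 := by simpa using hk
    simp [this, List.scanl]
  | cons x t ih =>
    cases k with
    | zero => simp [List.scanl]
    | succ k =>
      have hk' : k ≤ t.length := by simpa using hk
      rw [List.scanl_cons, List.getD_cons_succ, ih (a + x) k hk']
      simp [add_assoc]

-- the increasing list range a keeps exactly its first min a b elements under (· < b)
theorem filter_lt_range (a b : Nat) :
    (List.range a).filter (fun j => decide (j < b)) = List.range (min a b) := by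
  induction a with
  | zero => simp
  | succ a ih =>
    rw [List.range_succ, List.filter_append, ih]
    by_cases h : a < b
    · have hmin : min (a + 1) b = min a b + 1 := by omega
      have ha : min a b = a := by omega
      simp [h, ha, List.range_succ]
    · have hmin : min (a + 1) b = min a b := by omega
      simp [h, hmin]

-- mass of the substring [k, k+t) as a difference of prefix sums
theorem sum_take_drop (l : List Int) (k t : Nat) :
    ((l.drop k).take t).sum = (l.take (k + t)).sum - (l.take k).sum := by
  rw [List.take_add, List.sum_append]; ring

-- ===== VERDICT (by name: the statement is the Claim_ definition above) =====
theorem generate_linear_spectrum_spec : Claim_equal_generate_linear_spectrum := by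
  intro peptide _
  unfold Spec_generate_linear_spectrum generate_linear_spectrum generate_linear_spectrum_alt
  simp only []
  set n := peptide.length with hn
  set pre := List.scanl (· + ·) (0 : Int) peptide with hpre
  have hpre_getD : ∀ k : Nat, k ≤ n → pre.getD k 0 = (peptide.take k).sum := by
    intro k hk
    rw [hpre, scanl_add_getD peptide 0 k hk, zero_add]
  -- the trailing total mass
  have htail : calc_mass peptide = pre.getD n 0 := by
    rw [hpre_getD n le_rfl, List.take_length, calc_mass]
  rw [PySem.List.foldl_append_ite
        (p := fun p : Int × Int => p.1 + p.2 < (n : Int))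
        (f := fun p : Int × Int =>
          calc_mass (PySem.List.slice peptide (some p.1) (some (p.1 + p.2 + 1))))]
  rw [List.nil_append, List.filter_flatMap, List.map_flatMap]
  rw [PySem.List.pyRange_zero_nat n, List.flatMap_map]
  rw [htail]
  simp only [List.append_assoc, List.singleton_append]
  congr 1
  apply List.flatMap_congr
  intro k hk
  have hkn : k < n := List.mem_range.mp hk
  have hn1 : ((n : Int) - 1) = ((n - 1 : Nat) : Int) := by omega
  rw [hn1, PySem.List.pyRange_zero_nat (n - 1)]
  simp only [List.filter_map, List.map_map, Function.comp_def]
  have hfilter : (List.filter (fun j : Nat => decide ((k : Int) + (j : Int) < (n : Int)))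
      (List.range (n - 1))) = List.range (min (n - 1) (n - k)) := by
    rw [← filter_lt_range (n - 1) (n - k)]
    apply List.filter_congr
    intro j _
    have : ((k : Int) + (j : Int) < (n : Int)) ↔ (j < n - k) := by omega
    simp [this]
  rw [hfilter]
  have hL : min (n - 1) (n - k) = (if k = 0 then n - 1 else n) + 1 - (k + 1) := by
    split <;> omega
  rw [← hL, List.range'_eq_map_range, List.map_map]
  apply List.map_congr_left
  intro j hj
  have hjL : j < min (n - 1) (n - k) := List.mem_range.mp hj
  simp only [Function.comp_def]
  have hcast : ((k : Int) + (j : Int) + 1) = ((k : Int) + ((j + 1 : Nat) : Int)) := by push_cast; ring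
  rw [hcast, PySem.List.slice_natCast_add peptide k (j + 1), calc_mass,
      sum_take_drop peptide k (j + 1)]
  have h1 : pre.getD (k + 1 + j) 0 = (peptide.take (k + (j + 1))).sum := by
    have he : k + 1 + j = k + (j + 1) := by omega
    rw [he, hpre_getD (k + (j + 1)) (by omega)]
  have h2 : pre.getD k 0 = (peptide.take k).sum := hpre_getD k (by omega)
  rw [h1, h2]
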